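-- pv_equiv track=rewrite | github.com/ROGUE141/ai-name-validator | main.py | pick_first_token_as_name
-- ===== SOURCE A (Python) =====
-- def pick_first_token_as_name(input_name: str) -> str:
--     """
--     Keep original intent: validate the first plausible first-name token.
--     Splits by 'and', '&', commas, whitespace; returns the first token.
--     """
--     if not input_name:
--         return ""
--     cleaned = (
--         input_name.replace(",", " and ")
--         .replace("&", " and ")
--         .replace("  ", " ")
--         .strip()
--     )
--     for part in cleaned.split(" and "):
--         tokens = [t for t in part.strip().split() if t]
--         if tokens:
--             return tokens[0]
--     return ""
-- ===== SOURCE B (Python) =====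
-- def pick_first_token_as_name(input_name: str) -> str:
--     """Same normalization chain as before, but no ' and '-part loop:
--     the first whitespace token of the cleaned string is the answer."""
--     if not input_name:
--         return ""
--     cleaned = (
--         input_name.replace(",", " and ")
--         .replace("&", " and ")
--         .replace("  ", " ")
--         .strip()
--     )
--     tokens = cleaned.split()
--     return tokens[0] if tokens else ""
-- ===== Notes on version B (the rewrite author's own statement) =====
-- stated objective: simpler
-- what changed: Drops the nested loop over separator-delimited parts with per-part strip/split/filter: since the cleaned string is stripped, its first whitespace token is always the answer, so B does a single split() and returns the head.
import Mathlib
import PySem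

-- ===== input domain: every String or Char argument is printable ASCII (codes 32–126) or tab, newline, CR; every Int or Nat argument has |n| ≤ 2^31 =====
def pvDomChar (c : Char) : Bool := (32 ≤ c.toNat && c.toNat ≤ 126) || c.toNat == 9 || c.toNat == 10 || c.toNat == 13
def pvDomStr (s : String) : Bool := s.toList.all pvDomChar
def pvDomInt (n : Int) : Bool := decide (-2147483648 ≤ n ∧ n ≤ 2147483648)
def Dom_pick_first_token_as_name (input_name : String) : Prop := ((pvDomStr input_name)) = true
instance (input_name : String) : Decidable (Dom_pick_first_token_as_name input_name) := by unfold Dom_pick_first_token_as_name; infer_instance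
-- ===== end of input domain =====

-- B drops A's loop over separator-delimited parts: since the cleaned string is stripped,
-- its first whitespace token is always the answer, so B does one split() and takes the head (objective: simpler).

-- ===== PORT A =====
-- the per-part for-loop of A (over the split on the and-separator), on char lists
def pickALoop : List (List Char) → List Char
  | [] => []
  | p :: rest =>
    let tokens := (PySem.Chars.split₀ (PySem.Chars.strip p)).filter (fun t => !(t == []))
    match tokens with
    | [] => pickALoop rest
    | t :: _ => t

def pick_first_token_as_name (input_name : String) : String :=
  if input_name == "" then ""
  else
    let cleaned :=
      PySem.Chars.strip
        (PySem.Chars.replace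
          (PySem.Chars.replace
            (PySem.Chars.replace input_name.toList [','] (" and ".toList))
            ['&'] (" and ".toList))
          ("  ".toList) (" ".toList))
    String.ofList (pickALoop (PySem.Chars.splitOn cleaned (" and ".toList)))

-- ===== PORT B =====
def pick_first_token_as_name_alt (input_name : String) : String :=
  if input_name == "" then ""
  else
    let cleaned :=
      PySem.Chars.strip
        (PySem.Chars.replace
          (PySem.Chars.replace
            (PySem.Chars.replace input_name.toList [','] (" and ".toList))
            ['&'] (" and ".toList))
          ("  ".toList) (" ".toList))
    match PySem.Chars.split₀ cleaned with
    | [] => ""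
    | t :: _ => String.ofList t

-- ===== PRECONDITION & SPEC =====
def Spec_pick_first_token_as_name (input_name : String) (out : String) : Prop := out = pick_first_token_as_name_alt input_name
instance (input_name : String) (out : String) : Decidable (Spec_pick_first_token_as_name input_name out) := by unfold Spec_pick_first_token_as_name; infer_instance

-- ===== CLAIM (what is proved, stated in full; the proofs are below) =====
def Claim_equal_pick_first_token_as_name : Prop := ∀ (input_name : String), Dom_pick_first_token_as_name input_name → Spec_pick_first_token_as_name input_name (pick_first_token_as_name input_name)

-- ===== LEMMAS AND PROOFS =====

-- accumulator law for split₀.go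
theorem split0_go_acc (cs : List Char) (cur : List Char) (acc : List (List Char)) :
    PySem.Chars.split₀.go cs cur acc = acc.reverse ++ PySem.Chars.split₀.go cs cur [] := by
  induction cs generalizing cur acc with
  | nil =>
    simp [PySem.Chars.split₀.go]; split_ifs <;> simp
  | cons c rest ih =>
    simp only [PySem.Chars.split₀.go]
    split_ifs with h1 h2
    · rw [ih [] acc, ih [] []]
    · rw [ih [] (cur.reverse :: acc), ih [] [cur.reverse]]; simp
    · exact ih (c :: cur) acc

-- a run in progress: split₀.go with nonempty cur yields cur.reverse ++ first-token as head
theorem split0_go_head (cs : List Char) (cur : List Char) (h : cur ≠ []) :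
    ∃ ts, PySem.Chars.split₀.go cs cur [] =
      (cur.reverse ++ cs.takeWhile (fun c => !PySem.Chars.isspace c)) :: ts := by
  induction cs generalizing cur with
  | nil =>
    refine ⟨[], ?_⟩
    simp [PySem.Chars.split₀.go, h]
  | cons c rest ih =>
    simp only [PySem.Chars.split₀.go]
    by_cases hs : PySem.Chars.isspace c = true
    · rw [if_pos hs, if_neg (by simpa using h), split0_go_acc]
      exact ⟨PySem.Chars.split₀.go rest [] [], by simp [List.takeWhile, hs]⟩
    · rw [if_neg hs]
      obtain ⟨ts, hts⟩ := ih (c :: cur) (by simp)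
      refine ⟨ts, ?_⟩
      simp only [hts, List.takeWhile]
      simp [hs]

-- split₀ of a list with non-whitespace head: head of the result is the first token
theorem split0_head (c : Char) (rest : List Char) (hc : PySem.Chars.isspace c = false) :
    ∃ ts, PySem.Chars.split₀ (c :: rest) =
      ((c :: rest).takeWhile (fun c => !PySem.Chars.isspace c)) :: ts := by
  unfold PySem.Chars.split₀
  simp only [PySem.Chars.split₀.go, hc]
  obtain ⟨ts, hts⟩ := split0_go_head rest [c] (by simp)
  refine ⟨ts, ?_⟩
  simp [hts, List.takeWhile, hc]

-- appending a whitespace-led (or empty) tail does not change the first token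
theorem takeWhile_append_ws (u v : List Char)
    (hv : v.takeWhile (fun c => !PySem.Chars.isspace c) = []) :
    (u ++ v).takeWhile (fun c => !PySem.Chars.isspace c) = u.takeWhile (fun c => !PySem.Chars.isspace c) := by
  induction u with
  | nil => simpa using hv
  | cons a u ih =>
    by_cases ha : PySem.Chars.isspace a = true
    · simp [List.takeWhile, ha]
    · simp [List.takeWhile, ha, ih]

-- accumulator law for splitOn.go
theorem splitOn_go_acc (sep : List Char) (fuel : Nat) (l cur : List Char) (acc : List (List Char)) :
    PySem.Chars.splitOn.go sep fuel l cur acc = acc.reverse ++ PySem.Chars.splitOn.go sep fuel l cur [] := by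
  induction fuel generalizing l cur acc with
  | zero => simp [PySem.Chars.splitOn.go]
  | succ fuel ih =>
    match l with
    | [] => simp [PySem.Chars.splitOn.go]
    | c :: rest =>
      simp only [PySem.Chars.splitOn.go]
      split_ifs with h1
      · rw [ih _ [] (cur.reverse :: acc), ih _ [] [cur.reverse]]; simp
      · exact ih rest (c :: cur) acc

-- the first part produced by splitOn.go: cur.reverse ++ q, with q a prefix of l that is
-- either all of l or followed in l by sep
theorem splitOn_go_first (sep : List Char) (fuel : Nat) (l cur : List Char) :
    ∃ q ps, PySem.Chars.splitOn.go sep fuel l cur [] = (cur.reverse ++ q) :: ps ∧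
      (q = l ∨ ∃ r, l = q ++ sep ++ r ∧ q <+: l) := by
  induction fuel generalizing l cur with
  | zero => exact ⟨l, [], by simp [PySem.Chars.splitOn.go], Or.inl rfl⟩
  | succ fuel ih =>
    match l with
    | [] => exact ⟨[], [], by simp [PySem.Chars.splitOn.go], Or.inl rfl⟩
    | c :: rest =>
      simp only [PySem.Chars.splitOn.go]
      split_ifs with h1
      · rw [splitOn_go_acc]
        refine ⟨[], PySem.Chars.splitOn.go sep fuel ((c :: rest).drop sep.length) [] [],
          by simp, Or.inr ⟨(c :: rest).drop sep.length, ?_, by simp⟩⟩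
        have := List.isPrefixOf_iff_prefix.mp h1
        simpa using (List.prefix_iff_eq_append.mp this).symm
      · obtain ⟨q, ps, hgo, hq⟩ := ih rest (c :: cur)
        refine ⟨c :: q, ps, by simpa using hgo, ?_⟩
        rcases hq with h | ⟨r, hr, hp⟩
        · exact Or.inl (by rw [h])
        · exact Or.inr ⟨r, by simp [hr], by simpa using List.prefix_cons_inj c |>.mpr hp⟩

-- rstrip decomposition: l = rstrip l ++ trailing whitespace
theorem rstrip_decomp (l : List Char) :
    ∃ v, l = PySem.Chars.rstrip l ++ v ∧
      v.takeWhile (fun c => !PySem.Chars.isspace c) = [] := by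
  refine ⟨(l.reverse.takeWhile PySem.Chars.isspace).reverse, ?_, ?_⟩
  · unfold PySem.Chars.rstrip
    rw [← List.reverse_append, List.takeWhile_append_dropWhile, List.reverse_reverse]
  · rcases h : (l.reverse.takeWhile PySem.Chars.isspace).reverse with _ | ⟨a, v⟩
    · rfl
    · have ha : a ∈ l.reverse.takeWhile PySem.Chars.isspace := by
        have : a ∈ (l.reverse.takeWhile PySem.Chars.isspace).reverse := by simp [h]
        simpa using this
      have := List.mem_takeWhile_imp ha
      simp [List.takeWhile, this]

-- the head of strip l, when nonempty, is not whitespace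
theorem strip_head (l : List Char) :
    PySem.Chars.strip l = [] ∨
    ∃ c r, PySem.Chars.strip l = c :: r ∧ PySem.Chars.isspace c = false := by
  unfold PySem.Chars.strip PySem.Chars.rstrip PySem.Chars.lstrip
  rcases h : ((l.dropWhile PySem.Chars.isspace).reverse.dropWhile PySem.Chars.isspace).reverse with _ | ⟨c, r⟩
  · exact Or.inl rfl
  · refine Or.inr ⟨c, r, rfl, ?_⟩
    -- c is the head of a prefix of dropWhile isspace l, hence its head
    have hpre : (c :: r) <+: l.dropWhile PySem.Chars.isspace := by
      rw [← h]
      have := List.dropWhile_suffix PySem.Chars.isspace (l := (l.dropWhile PySem.Chars.isspace).reverse)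
      exact List.reverse_suffix.mp (by simpa using this)
    obtain ⟨t, ht⟩ := hpre
    have : (l.dropWhile PySem.Chars.isspace).head? = some c := by rw [← ht]; rfl
    have := List.head?_dropWhile_not PySem.Chars.isspace l
    simp_all

-- A's part loop on the split of a stripped string returns exactly the head of split₀
theorem key_first_part (cs : List Char)
    (h : cs = [] ∨ ∃ c r, cs = c :: r ∧ PySem.Chars.isspace c = false) :
    pickALoop (PySem.Chars.splitOn cs (" and ".toList)) = (PySem.Chars.split₀ cs).headD [] := by
  rcases h with rfl | ⟨c, r, rfl, hc⟩
  · rfl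
  · simp only [PySem.Chars.splitOn]
    obtain ⟨q, ps, hgo, hq⟩ := splitOn_go_first (" and ".toList) ((c :: r).length + 1) (c :: r) []
    rw [hgo]
    simp only [List.reverse_nil, List.nil_append]
    -- q is a nonempty prefix of c :: r, so q = c :: q2
    have hsepws : PySem.Chars.isspace ' ' = true := by decide
    rcases q with _ | ⟨d, q2⟩
    · exfalso
      rcases hq with h | ⟨r', hr', _⟩
      · exact List.cons_ne_nil c r h.symm
      · have : c = ' ' := by simpa using congrArg (fun l => l.headD ' ') hr'
        rw [this, hsepws] at hc; exact absurd hc (by decide)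
    · have hd : d = c := by
        rcases hq with h | ⟨r', hr', _⟩
        · exact (List.cons.injEq d q2 c r ▸ h).1
        · have := congrArg (fun l => l.headD ' ') hr'
          simpa using this.symm
      subst hd
      -- strip q = rstrip q, nonempty with head d
      have hlstrip : PySem.Chars.lstrip (d :: q2) = d :: q2 := by
        simp [PySem.Chars.lstrip, List.dropWhile, hc]
      obtain ⟨v, hdecomp, hv⟩ := rstrip_decomp (d :: q2)
      have hrne : PySem.Chars.rstrip (d :: q2) ≠ [] := by
        intro hnil
        rw [hnil, List.nil_append] at hdecomp
        rw [← hdecomp] at hv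
        simp [List.takeWhile, hc] at hv
      rcases hrstr : PySem.Chars.rstrip (d :: q2) with _ | ⟨e, w⟩
      · exact absurd hrstr hrne
      have he : e = d := by
        rw [hrstr] at hdecomp
        exact ((List.cons.injEq d q2 e (w ++ v) ▸ hdecomp).1).symm
      subst he
      have hstrip : PySem.Chars.strip (e :: q2) = e :: w := by
        rw [PySem.Chars.strip, hlstrip, hrstr]
      obtain ⟨ts, hsplit⟩ := split0_head e w hc
      -- first token of the part equals the first token of the whole cleaned string
      have htok : (e :: w).takeWhile (fun c => !PySem.Chars.isspace c) =
          (e :: r).takeWhile (fun c => !PySem.Chars.isspace c) := by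
        have h1 : (e :: w).takeWhile (fun c => !PySem.Chars.isspace c) =
            (e :: q2).takeWhile (fun c => !PySem.Chars.isspace c) := by
          rw [hdecomp, hrstr]
          exact (takeWhile_append_ws (e :: w) v hv).symm
        rcases hq with h | ⟨r', hr', _⟩
        · rw [h1, h]
        · rw [h1, hr', List.append_assoc]
          refine (takeWhile_append_ws (e :: q2) ((" and ".toList) ++ r') ?_).symm
          simp [hsepws]
      have hTne : ((e :: w).takeWhile (fun c => !PySem.Chars.isspace c)) = e :: (w.takeWhile (fun c => !PySem.Chars.isspace c)) := by
        simp [List.takeWhile, hc]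
      obtain ⟨ts', hsplit'⟩ := split0_head e r hc
      simp only [pickALoop, hstrip, hsplit, hsplit', hTne, List.filter]
      simp [htok.symm, hTne]

-- ===== VERDICT (by name: the statement is the Claim_ definition above) =====
theorem pick_first_token_as_name_spec : Claim_equal_pick_first_token_as_name := by
  intro s _
  unfold Spec_pick_first_token_as_name pick_first_token_as_name pick_first_token_as_name_alt
  by_cases hs : (s == "") = true
  · simp [hs]
  · simp only [hs, Bool.false_eq_true, if_false]
    rw [key_first_part _ (strip_head _)]
    rcases hsp : PySem.Chars.split₀ (PySem.Chars.strip
        (PySem.Chars.replace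
          (PySem.Chars.replace
            (PySem.Chars.replace s.toList [','] (" and ".toList))
            ['&'] (" and ".toList))
          ("  ".toList) (" ".toList))) with _ | ⟨t, ts⟩
    · decide
    · rfl
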